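-- pv_equiv track=rewrite | github.com/joshanashakya/dissertation | workspace/dataset/java-python/GeeksForGeeks/1302/A/2.py | OddDivCount
-- ===== SOURCE A (Python) =====
-- def OddDivCount(a, b):
--
--     # variable to odd divisor count
--     res = 0
--
--     # iterate from a to b and count
--     # their number of divisors
--     for i in range(a, b + 1) :
--
--         # variable to divisor count
--         divCount = 0
--         for j in range(1, i + 1) :
--             if (i % j == 0) :
--                 divCount += 1
--
--         # if count of divisor is odd
--         # then increase res by 1
--         if (divCount % 2) :
--             res += 1
--     return res
-- ===== SOURCE B (Python) =====
-- def OddDivCount(a, b):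
--     # Numbers with an odd divisor count are exactly the positive perfect squares,
--     # so count squares in [max(a,1), b] as a difference of integer square roots.
--     lo = a if a > 1 else 1
--     if b < lo:
--         return 0
--     return _isqrt(b) - _isqrt(lo - 1)
--
-- def _isqrt(n):
--     # largest r >= 0 with r*r <= n (requires n >= 0), by binary search
--     lo, hi = 0, n + 1
--     while hi - lo > 1:
--         mid = (lo + hi) // 2
--         if mid * mid <= n:
--             lo = mid
--         else:
--             hi = mid
--     return lo
-- ===== Notes on version B (the rewrite author's own statement) =====
-- stated objective: alternative
-- what changed: A scans every i in [a,b] and counts each one's divisors by trial division; B uses the fact that odd-divisor-count numbers are exactly the positive perfect squares and returns isqrt(b)-isqrt(max(a,1)-1) with a binary-search integer square root.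
import Mathlib
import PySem

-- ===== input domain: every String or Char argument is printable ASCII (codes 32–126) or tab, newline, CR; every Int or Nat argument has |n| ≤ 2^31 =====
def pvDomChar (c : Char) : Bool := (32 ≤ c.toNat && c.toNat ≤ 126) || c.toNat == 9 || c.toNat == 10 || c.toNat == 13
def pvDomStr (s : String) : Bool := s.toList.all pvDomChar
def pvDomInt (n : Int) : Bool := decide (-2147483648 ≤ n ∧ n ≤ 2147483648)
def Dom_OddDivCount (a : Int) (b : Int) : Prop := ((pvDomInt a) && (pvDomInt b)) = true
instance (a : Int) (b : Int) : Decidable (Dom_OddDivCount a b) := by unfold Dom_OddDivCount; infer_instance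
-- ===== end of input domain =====

-- B replaces A's double trial-division scan by the square-root difference
-- isqrt(b) - isqrt(max(a,1)-1): numbers with an odd divisor count are exactly
-- the positive perfect squares (objective: alternative).

-- ===== PORT A =====
-- inner loop: divCount = 0; for j in range(1, i+1): if i % j == 0: divCount += 1
def pvDivCount (i : Int) : Int :=
  (PySem.List.pyRange 1 (i + 1) 1).foldl
    (fun divCount j => if PySem.Int.mod i j = 0 then divCount + 1 else divCount) 0

def OddDivCount (a : Int) (b : Int) : Int :=
  (PySem.List.pyRange a (b + 1) 1).foldl
    (fun res i => if PySem.Int.mod (pvDivCount i) 2 ≠ 0 then res + 1 else res) 0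

-- ===== PORT B =====
-- while hi - lo > 1: mid = (lo+hi)//2; if mid*mid <= n: lo = mid else: hi = mid
def pvIsqrtLoop (n lo hi : Int) : Int :=
  if _h : hi - lo > 1 then
    let mid := PySem.Int.floordiv (lo + hi) 2
    if mid * mid ≤ n then pvIsqrtLoop n mid hi else pvIsqrtLoop n lo mid
  else lo
termination_by (hi - lo).toNat
decreasing_by
  all_goals
    have hm := (PySem.Int.floordiv_eq_iff_of_pos (a := lo + hi) (b := 2)
      (q := PySem.Int.floordiv (lo + hi) 2) (by norm_num)).1 rfl
    omega

def pvIsqrt (n : Int) : Int := pvIsqrtLoop n 0 (n + 1)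

def OddDivCount_alt (a : Int) (b : Int) : Int :=
  let lo := if a > 1 then a else 1
  if b < lo then 0 else pvIsqrt b - pvIsqrt (lo - 1)

-- ===== PRECONDITION & SPEC =====
def Spec_OddDivCount (a : Int) (b : Int) (out : Int) : Prop := out = OddDivCount_alt a b
instance (a : Int) (b : Int) (out : Int) : Decidable (Spec_OddDivCount a b out) := by unfold Spec_OddDivCount; infer_instance

-- ===== CLAIM (what is proved, stated in full; the proofs are below) =====
def Claim_equal_OddDivCount : Prop := ∀ (a : Int) (b : Int), Dom_OddDivCount a b → Spec_OddDivCount a b (OddDivCount a b)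

-- ===== LEMMAS AND PROOFS =====

-- the divisors of n in [1, n], as a finset
def pvD (n : Nat) : Finset ℕ := (Finset.Ico 1 (n + 1)).filter (· ∣ n)

-- the outer loop's test, as a predicate
def pvQ (i : Int) : Bool := decide (PySem.Int.mod (pvDivCount i) 2 ≠ 0)

lemma pvDivCount_nonpos {i : Int} (h : i ≤ 0) : pvDivCount i = 0 := by
  unfold pvDivCount
  rw [PySem.List.pyRange_one_eq_nil (by omega)]
  rfl

lemma pvQ_nonpos {i : Int} (h : i ≤ 0) : pvQ i = false := by
  simp [pvQ, pvDivCount_nonpos h, PySem.Int.mod]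

lemma pvCnt (n m : Nat) :
    (PySem.List.pyRange 1 ((m : Int) + 1) 1).countP
      (fun j => decide (PySem.Int.mod (n : Int) j = 0))
      = ((Finset.Ico 1 (m + 1)).filter (· ∣ n)).card := by
  induction m with
  | zero =>
      rw [PySem.List.pyRange_one_eq_nil (by norm_num)]
      simp
  | succ m ih =>
      have hsplit : PySem.List.pyRange 1 ((↑(m + 1) : Int) + 1) 1
          = PySem.List.pyRange 1 ((m : Int) + 1) 1 ++ [(m : Int) + 1] := by
        have := PySem.List.pyRange_one_succ_right (a := 1) (b := (m : Int) + 1) (by omega)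
        push_cast
        convert this using 2
      have hI : Finset.Ico 1 (m + 1 + 1) = insert (m + 1) (Finset.Ico 1 (m + 1)) :=
        Nat.Ico_succ_right_eq_insert_Ico (by omega)
      rw [hsplit, List.countP_append, ih, hI, Finset.filter_insert]
      have hmod : (PySem.Int.mod (n : Int) ((m : Int) + 1) = 0) ↔ ((m + 1) ∣ n) := by
        rw [PySem.Int.mod_eq_zero_iff_dvd]
        constructor
        · intro h; exact_mod_cast h
        · intro h; exact_mod_cast h
      by_cases hd : (m + 1) ∣ n
      · rw [if_pos hd, Finset.card_insert_of_notMem (by simp)]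
        simp only [List.countP_cons, List.countP_nil]
        have : ((m : Int) + 1) ∣ (n : Int) := by exact_mod_cast hd
        simp [this]
      · rw [if_neg hd]
        have : ¬ ((m : Int) + 1) ∣ (n : Int) := fun hc => hd (by exact_mod_cast hc)
        simp [this]

lemma pvDivCount_eq_card (n : Nat) : pvDivCount (n : Int) = ((pvD n).card : Int) := by
  unfold pvDivCount pvD
  rw [PySem.List.foldl_ite_add_one]
  rw [pvCnt n n]
  omega

lemma pvD_mem {n d : Nat} (hn : 1 ≤ n) : d ∈ pvD n ↔ d ∣ n ∧ 0 < d := by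
  unfold pvD
  simp only [Finset.mem_filter, Finset.mem_Ico]
  constructor
  · rintro ⟨⟨h1, _⟩, h3⟩; exact ⟨h3, h1⟩
  · rintro ⟨h1, h2⟩
    exact ⟨⟨h2, by have := Nat.le_of_dvd (by omega) h1; omega⟩, h1⟩

lemma pvD_card_parity (n : Nat) (hn : 1 ≤ n) :
    (pvD n).card % 2 = (if Nat.sqrt n * Nat.sqrt n = n then 1 else 0) := by
  classical
  set s := pvD n with hs
  -- split the divisors by comparison of d*d with n
  have hsplit1 : (s.filter (fun d => d * d < n)).card
      + (s.filter (fun d => ¬ d * d < n)).card = s.card :=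
    Finset.card_filter_add_card_filter_not _
  have hsplit2 : ((s.filter (fun d => ¬ d * d < n)).filter (fun d => d * d = n)).card
      + ((s.filter (fun d => ¬ d * d < n)).filter (fun d => ¬ d * d = n)).card
      = (s.filter (fun d => ¬ d * d < n)).card :=
    Finset.card_filter_add_card_filter_not _
  -- the strictly large divisors biject with the strictly small ones via d ↦ n / d
  have hbij : ((s.filter (fun d => ¬ d * d < n)).filter (fun d => ¬ d * d = n)).card
      = (s.filter (fun d => d * d < n)).card := by
    apply Finset.card_bij (fun d _ => n / d)
    · intro d hd
      simp only [Finset.mem_filter] at hd ⊢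
      obtain ⟨⟨hdm, hge⟩, hne⟩ := hd
      obtain ⟨hdvd, hpos⟩ := (pvD_mem hn).mp hdm
      obtain ⟨k, hk⟩ := hdvd
      have hkd : n / d = k := by rw [hk, Nat.mul_div_cancel_left k hpos]
      have hkpos : 0 < k := Nat.pos_of_ne_zero (by rintro rfl; omega)
      have hkd2 : k < d := by
        rcases Nat.lt_or_ge k d with h | h
        · exact h
        · exfalso
          have : d * d ≤ d * k := Nat.mul_le_mul_left d h
          omega
      have hkk : k * k < n := by
        calc k * k < d * k := (Nat.mul_lt_mul_right hkpos).mpr hkd2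
        _ = n := hk.symm
      rw [hkd]
      exact ⟨(pvD_mem hn).mpr ⟨⟨d, by rw [hk, Nat.mul_comm]⟩, hkpos⟩, hkk⟩
    · intro d1 h1 d2 h2 heq
      simp only [Finset.mem_filter] at h1 h2
      have hd1 : d1 ∣ n := ((pvD_mem hn).mp h1.1.1).1
      have hd2 : d2 ∣ n := ((pvD_mem hn).mp h2.1.1).1
      have hne : n ≠ 0 := by omega
      rw [← Nat.div_div_self hd1 hne, ← Nat.div_div_self hd2 hne, heq]
    · intro e he
      simp only [Finset.mem_filter] at he
      obtain ⟨hem, hlt⟩ := he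
      obtain ⟨hedvd, hepos⟩ := (pvD_mem hn).mp hem
      obtain ⟨f, hf⟩ := hedvd
      have hfe : n / e = f := by rw [hf, Nat.mul_div_cancel_left f hepos]
      have hfpos : 0 < f := Nat.pos_of_ne_zero (by rintro rfl; omega)
      have hef : e < f := by
        rcases Nat.lt_or_ge e f with h | h
        · exact h
        · exfalso
          have : e * f ≤ e * e := Nat.mul_le_mul_left e h
          omega
      have hff : n < f * f := by
        calc n = e * f := hf
        _ < f * f := (Nat.mul_lt_mul_right hfpos).mpr hef
      refine ⟨f, ?_, ?_⟩
      · simp only [Finset.mem_filter]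
        exact ⟨⟨(pvD_mem hn).mpr ⟨⟨e, by rw [hf, Nat.mul_comm]⟩, hfpos⟩, by omega⟩, by omega⟩
      · rw [hf, Nat.mul_comm, Nat.mul_div_cancel_left e hfpos]
  -- the middle part has exactly one element iff n is a square
  have hmid : ((s.filter (fun d => ¬ d * d < n)).filter (fun d => d * d = n)).card
      = (if Nat.sqrt n * Nat.sqrt n = n then 1 else 0) := by
    by_cases hsq : Nat.sqrt n * Nat.sqrt n = n
    · rw [if_pos hsq]
      have : (s.filter (fun d => ¬ d * d < n)).filter (fun d => d * d = n)
          = {Nat.sqrt n} := by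
        ext d
        simp only [Finset.mem_filter, Finset.mem_singleton]
        constructor
        · rintro ⟨⟨_, _⟩, hdd⟩
          rw [← hdd, Nat.sqrt_eq]
        · intro hd
          subst hd
          have hpos : 0 < Nat.sqrt n := by
            rcases Nat.eq_zero_or_pos (Nat.sqrt n) with h | h
            · exfalso; rw [h] at hsq; omega
            · exact h
          exact ⟨⟨(pvD_mem hn).mpr ⟨⟨Nat.sqrt n, hsq.symm⟩, hpos⟩, by omega⟩, hsq⟩
      rw [this, Finset.card_singleton]
    · rw [if_neg hsq]
      have : (s.filter (fun d => ¬ d * d < n)).filter (fun d => d * d = n) = ∅ := by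
        ext d
        simp only [Finset.mem_filter, Finset.notMem_empty, iff_false]
        rintro ⟨_, hdd⟩
        exact hsq (by rw [← hdd, Nat.sqrt_eq])
      rw [this, Finset.card_empty]
  by_cases hsq : Nat.sqrt n * Nat.sqrt n = n
  · rw [if_pos hsq] at hmid ⊢
    omega
  · rw [if_neg hsq] at hmid ⊢
    omega

lemma pv_sqrt_succ (n : Nat) :
    Nat.sqrt (n + 1) =
      Nat.sqrt n + (if Nat.sqrt (n + 1) * Nat.sqrt (n + 1) = n + 1 then 1 else 0) := by
  have h1 : Nat.sqrt n * Nat.sqrt n ≤ n := Nat.sqrt_le n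
  have h2 : n < (Nat.sqrt n + 1) * (Nat.sqrt n + 1) := Nat.lt_succ_sqrt n
  have h3 : Nat.sqrt (n + 1) * Nat.sqrt (n + 1) ≤ n + 1 := Nat.sqrt_le (n + 1)
  have h4 : n + 1 < (Nat.sqrt (n + 1) + 1) * (Nat.sqrt (n + 1) + 1) := Nat.lt_succ_sqrt (n + 1)
  have h5 : Nat.sqrt n ≤ Nat.sqrt (n + 1) := Nat.sqrt_le_sqrt (by omega)
  have h6 : Nat.sqrt (n + 1) ≤ Nat.sqrt n + 1 := by
    by_contra hc
    push Not at hc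
    have : (Nat.sqrt n + 2) * (Nat.sqrt n + 2) ≤ Nat.sqrt (n + 1) * Nat.sqrt (n + 1) :=
      Nat.mul_le_mul hc hc
    nlinarith
  by_cases hsq : Nat.sqrt (n + 1) * Nat.sqrt (n + 1) = n + 1
  · rw [if_pos hsq]
    have : Nat.sqrt (n + 1) ≠ Nat.sqrt n := by
      intro he
      rw [he] at hsq
      omega
    omega
  · rw [if_neg hsq]
    have : Nat.sqrt (n + 1) ≠ Nat.sqrt n + 1 := by
      intro he
      rw [he] at h3 hsq
      omega
    omega

lemma pvQ_pos (n : Nat) (hn : 1 ≤ n) :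
    pvQ (n : Int) = (if Nat.sqrt n * Nat.sqrt n = n then true else false) := by
  have hcard := pvD_card_parity n hn
  have hmod : PySem.Int.mod (pvDivCount (n : Int)) 2 = (((pvD n).card % 2 : Nat) : Int) := by
    rw [pvDivCount_eq_card, PySem.Int.mod_eq_emod_of_pos (show (0:Int) < 2 by norm_num)]
    push_cast
    rfl
  unfold pvQ
  rw [hmod, hcard]
  by_cases hsq : Nat.sqrt n * Nat.sqrt n = n
  · simp [hsq]
  · simp [hsq]

lemma pv_countP_squares (n : Nat) :
    (PySem.List.pyRange 1 ((n : Int) + 1) 1).countP pvQ = Nat.sqrt n := by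
  induction n with
  | zero =>
      rw [PySem.List.pyRange_one_eq_nil (by norm_num)]
      simp
  | succ n ih =>
      have hsplit : PySem.List.pyRange 1 ((↑(n + 1) : Int) + 1) 1
          = PySem.List.pyRange 1 ((n : Int) + 1) 1 ++ [(n : Int) + 1] := by
        have := PySem.List.pyRange_one_succ_right (a := 1) (b := (n : Int) + 1) (by omega)
        push_cast
        convert this using 2
      rw [hsplit, List.countP_append, ih]
      have hq : pvQ ((n : Int) + 1) = (if Nat.sqrt (n + 1) * Nat.sqrt (n + 1) = n + 1 then true else false) := by
        have := pvQ_pos (n + 1) (by omega)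
        push_cast at this
        exact this
      rw [pv_sqrt_succ n]
      by_cases hsq : Nat.sqrt (n + 1) * Nat.sqrt (n + 1) = n + 1
      · rw [if_pos hsq] at hq ⊢
        simp [hq]
      · rw [if_neg hsq] at hq ⊢
        simp [hq]

lemma pv_outer (a b : Int) :
    OddDivCount a b = ((PySem.List.pyRange a (b + 1) 1).countP pvQ : Int) := by
  unfold OddDivCount
  rw [PySem.List.foldl_ite_add_one]
  rw [Int.zero_add]
  congr 1

lemma pvIsqrtLoop_eq (n lo hi : Int) :
    0 ≤ lo → lo * lo ≤ n → n < hi * hi → lo < hi →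
    pvIsqrtLoop n lo hi = (Nat.sqrt n.toNat : Int) := by
  fun_induction pvIsqrtLoop n lo hi with
  | case1 lo hi h mid hle ih =>
      intro h0 hl hh hlh
      have hm := (PySem.Int.floordiv_eq_iff_of_pos (a := lo + hi) (b := 2)
        (q := PySem.Int.floordiv (lo + hi) 2) (by norm_num)).1 rfl
      apply ih
      · show (0 : Int) ≤ mid
        omega
      · exact hle
      · exact hh
      · show mid < hi
        omega
  | case2 lo hi h mid hgt ih =>
      intro h0 hl hh hlh
      have hm := (PySem.Int.floordiv_eq_iff_of_pos (a := lo + hi) (b := 2)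
        (q := PySem.Int.floordiv (lo + hi) 2) (by norm_num)).1 rfl
      apply ih
      · exact h0
      · exact hl
      · omega
      · show lo < mid
        omega
  | case3 lo hi h =>
      intro h0 hl hh hlh
      -- hi = lo + 1, so lo*lo ≤ n < (lo+1)*(lo+1): lo is the integer square root
      have hhi : hi = lo + 1 := by omega
      subst hhi
      have hn0 : 0 ≤ n := le_trans (mul_nonneg h0 h0) hl
      have hlo : ((lo.toNat : Int)) = lo := Int.toNat_of_nonneg h0
      have hle : lo.toNat * lo.toNat ≤ n.toNat := by
        have : ((lo.toNat * lo.toNat : Nat) : Int) ≤ ((n.toNat : Nat) : Int) := by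
          push_cast
          rw [hlo, Int.toNat_of_nonneg hn0]
          exact hl
        exact_mod_cast this
      have hlt : n.toNat < (lo.toNat + 1) * (lo.toNat + 1) := by
        have : ((n.toNat : Nat) : Int) < (((lo.toNat + 1) * (lo.toNat + 1) : Nat) : Int) := by
          push_cast
          rw [hlo, Int.toNat_of_nonneg hn0]
          exact hh
        exact_mod_cast this
      have h1 : lo.toNat ≤ Nat.sqrt n.toNat := Nat.le_sqrt.mpr hle
      have h2 : Nat.sqrt n.toNat < lo.toNat + 1 := Nat.sqrt_lt.mpr hlt
      have : Nat.sqrt n.toNat = lo.toNat := by omega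
      rw [this, hlo]

lemma pvIsqrt_eq (n : Int) (h : 0 ≤ n) : pvIsqrt n = (Nat.sqrt n.toNat : Int) := by
  unfold pvIsqrt
  exact pvIsqrtLoop_eq n 0 (n + 1) le_rfl (by simpa using h) (by nlinarith) (by omega)

lemma pv_count_seg (lo b : Int) (h1 : 1 ≤ lo) (h2 : lo ≤ b) :
    ((PySem.List.pyRange lo (b + 1) 1).countP pvQ : Int)
      = (Nat.sqrt b.toNat : Int) - (Nat.sqrt (lo - 1).toNat : Int) := by
  have hsplit := PySem.List.pyRange_one_append 1 lo (b + 1) h1 (by omega)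
  have htot : (PySem.List.pyRange 1 (b + 1) 1).countP pvQ = Nat.sqrt b.toNat := by
    have h := pv_countP_squares b.toNat
    have hb : ((b.toNat : Nat) : Int) = b := Int.toNat_of_nonneg (by omega)
    rwa [hb] at h
  have hpre : (PySem.List.pyRange 1 lo 1).countP pvQ = Nat.sqrt (lo - 1).toNat := by
    have h := pv_countP_squares (lo - 1).toNat
    have hc : (((lo - 1).toNat : Nat) : Int) + 1 = lo := by omega
    rwa [hc] at h
  have hsum := congrArg (List.countP pvQ) hsplit
  rw [List.countP_append] at hsum
  omega

-- ===== VERDICT (by name: the statement is the Claim_ definition above) =====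
theorem OddDivCount_spec : Claim_equal_OddDivCount := by
  intro a b _
  unfold Spec_OddDivCount OddDivCount_alt
  rw [pv_outer]
  by_cases ha : a > 1
  · simp only [if_pos ha]
    by_cases hb : b < a
    · rw [if_pos hb, PySem.List.pyRange_one_eq_nil (by omega)]
      rfl
    · rw [if_neg hb, pvIsqrt_eq b (by omega), pvIsqrt_eq (a - 1) (by omega)]
      exact pv_count_seg a b (by omega) (by omega)
  · simp only [if_neg ha]
    by_cases hb : b < 1
    · rw [if_pos hb]
      have h0 : (PySem.List.pyRange a (b + 1) 1).countP pvQ = 0 :=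
        List.countP_eq_zero.mpr (fun i hi => by
          have hm := PySem.List.mem_pyRange_one.mp hi
          simp [pvQ_nonpos (by omega : i ≤ 0)])
      rw [h0]
      rfl
    · rw [if_neg hb, pvIsqrt_eq b (by omega), pvIsqrt_eq (1 - 1) (by norm_num)]
      have hsplit := PySem.List.pyRange_one_append a 1 (b + 1) (by omega) (by omega)
      rw [hsplit, List.countP_append]
      have h0 : (PySem.List.pyRange a 1 1).countP pvQ = 0 :=
        List.countP_eq_zero.mpr (fun i hi => by
          have hm := PySem.List.mem_pyRange_one.mp hi
          simp [pvQ_nonpos (by omega : i ≤ 0)])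
      rw [h0]
      have hseg := pv_count_seg 1 b (le_refl 1) (by omega)
      omega
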